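-- pv_equiv track=rewrite | github.com/shin-ee-chen/volta-bla | analysis_tools.py | get_rank_count
-- ===== SOURCE A (Python) =====
-- def get_rank_count(ranks):
--     rank_count = {}
--
--     if not isinstance(ranks, list):
--         ranks = ranks.tolist()
--
--     for rank in ranks:
--         str_rank = [str(r) for r in rank]
--         rank_key = ''.join(str_rank)
--         if rank_key in rank_count:
--             rank_count[rank_key] += 1
--         else:
--             rank_count[rank_key] = 1
--     return rank_count
-- ===== SOURCE B (Python) =====
-- def get_rank_count(ranks):
--     if not isinstance(ranks, list):
--         ranks = ranks.tolist()
--     keys = [''.join(str(r) for r in rank) for rank in ranks]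
--
--     def go(ks):
--         # count-and-remove recursion: take the first key, count it by how much
--         # the list shrinks when all its copies are filtered out, recurse on the rest
--         if not ks:
--             return {}
--         k = ks[0]
--         rest = [x for x in ks[1:] if x != k]
--         d = {k: len(ks) - len(rest)}
--         d.update(go(rest))
--         return d
--
--     return go(keys)
-- ===== Notes on version B (the rewrite author's own statement) =====
-- stated objective: alternative
-- what changed: Replaces A's single-pass running-tally dict by a count-and-remove recursion: repeatedly take the first remaining key, derive its count from how much the list shrinks when all its copies are filtered out, and recurse on the shrunken list, building the dict front-to-back.
import Mathlib
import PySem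

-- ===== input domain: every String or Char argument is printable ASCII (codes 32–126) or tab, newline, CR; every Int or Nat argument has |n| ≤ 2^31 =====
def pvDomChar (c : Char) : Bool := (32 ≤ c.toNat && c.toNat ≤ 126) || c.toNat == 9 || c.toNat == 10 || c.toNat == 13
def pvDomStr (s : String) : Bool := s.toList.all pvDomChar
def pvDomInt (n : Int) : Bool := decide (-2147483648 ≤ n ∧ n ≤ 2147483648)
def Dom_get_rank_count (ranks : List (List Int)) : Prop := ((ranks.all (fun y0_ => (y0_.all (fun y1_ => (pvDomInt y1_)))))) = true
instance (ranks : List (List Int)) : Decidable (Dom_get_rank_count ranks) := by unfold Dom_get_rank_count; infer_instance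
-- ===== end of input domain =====

-- ===== PORT A =====
-- B replaces A's single-pass running-tally dict by a count-and-remove recursion; return values proved equal.
def get_rank_count (ranks : List (List Int)) : List (String × Int) :=
  (ranks.foldl (fun rank_count rank =>
      let str_rank := rank.map (fun r => PySem.Int.toStr r)
      let rank_key := PySem.Str.join "" str_rank
      match rank_count.get? rank_key with
      | some v => rank_count.insert rank_key (v + 1)
      | none => rank_count.insert rank_key 1) PySem.Dict.empty).items

-- ===== PORT B =====
-- go ks: first key, count = len(ks) - len(rest) after filtering out its copies, recurse on rest
def grcGo : List String → List (String × Int)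
  | [] => []
  | k :: tl =>
    let rest := tl.filter (fun x => x ≠ k)
    (k, (((k :: tl).length - rest.length : Nat) : Int)) :: grcGo rest
  termination_by ks => ks.length
  decreasing_by
    have h := List.length_filter_le (fun x : {x // x ∈ tl} => decide (↑x ≠ k)) tl.attach
    simp at h ⊢
    omega

def get_rank_count_alt (ranks : List (List Int)) : List (String × Int) :=
  let keys := ranks.map (fun rank => PySem.Str.join "" (rank.map (fun r => PySem.Int.toStr r)))
  grcGo keys

-- ===== PRECONDITION & SPEC =====
def Spec_get_rank_count (ranks : List (List Int)) (out : List (String × Int)) : Prop := out = get_rank_count_alt ranks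
instance (ranks : List (List Int)) (out : List (String × Int)) : Decidable (Spec_get_rank_count ranks out) := by unfold Spec_get_rank_count; infer_instance

-- ===== CLAIM =====
def Claim_equal_get_rank_count : Prop := ∀ (ranks : List (List Int)), Dom_get_rank_count ranks → Spec_get_rank_count ranks (get_rank_count ranks)

-- ===== LEMMAS AND PROOFS =====

-- A's branch is exactly "insert key (old count + 1)" with default 0
theorem get_rank_count_step (d : PySem.Dict String Int) (k : String) :
    (match d.get? k with
     | some v => d.insert k (v + 1)
     | none => d.insert k 1) = d.insert k (d.getD k 0 + 1) := by
  cases h : d.get? k with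
  | some v => simp [PySem.Dict.getD_eq_get?_getD, h]
  | none => simp [PySem.Dict.getD_eq_get?_getD, h]

-- A's fold over ranks is Counter of the joined keys
theorem get_rank_count_eq_counter (ranks : List (List Int)) :
    get_rank_count ranks =
      (PySem.Dict.counter (ranks.map (fun rank =>
        PySem.Str.join "" (rank.map (fun r => PySem.Int.toStr r))))).items := by
  unfold get_rank_count
  congr 1
  rw [show (fun (rank_count : PySem.Dict String Int) (rank : List Int) =>
        let str_rank := rank.map (fun r => PySem.Int.toStr r)
        let rank_key := PySem.Str.join "" str_rank
        match rank_count.get? rank_key with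
        | some v => rank_count.insert rank_key (v + 1)
        | none => rank_count.insert rank_key 1)
      = (fun (rank_count : PySem.Dict String Int) (rank : List Int) =>
          rank_count.insert (PySem.Str.join "" (rank.map (fun r => PySem.Int.toStr r)))
            (rank_count.getD (PySem.Str.join "" (rank.map (fun r => PySem.Int.toStr r))) 0 + 1))
      from funext fun d => funext fun rank => get_rank_count_step d _]
  rw [← PySem.Dict.foldl_insert_getD_add_one_eq_counter, List.foldl_map]

theorem set_add_mem (s : List String) (x : String) (hx : x ∈ s) :
    PySem.Set.add s x = s := by
  simp [PySem.Set.add, PySem.Set.contains, hx]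

theorem set_add_not_mem (s : List String) (x : String) (hx : x ∉ s) :
    PySem.Set.add s x = s ++ [x] := by
  simp [PySem.Set.add, PySem.Set.contains, hx]

-- elements already seen are skipped by the ofList fold
theorem ofList_foldl_add_filter (s : List String) (k : String) (hk : k ∈ s) (l : List String) :
    l.foldl PySem.Set.add s = (l.filter (fun x => x ≠ k)).foldl PySem.Set.add s := by
  induction l generalizing s with
  | nil => rfl
  | cons x tl ih =>
    by_cases hx : x = k
    · subst hx
      have hfc : (x :: tl).filter (fun y => y ≠ x) = tl.filter (fun y => y ≠ x) := by simp
      rw [hfc, List.foldl_cons, set_add_mem s x hk]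
      exact ih s hk
    · have hfc : (x :: tl).filter (fun y => y ≠ k) = x :: tl.filter (fun y => y ≠ k) := by
        simp [hx]
      rw [hfc, List.foldl_cons, List.foldl_cons]
      exact ih (PySem.Set.add s x) (by
        by_cases hc : x ∈ s
        · rw [set_add_mem s x hc]; exact hk
        · rw [set_add_not_mem s x hc]; exact List.mem_append_left _ hk)

-- a head absent from the rest is carried through the ofList fold
theorem foldl_add_cons (a : String) (s l : List String) (ha : a ∉ l) :
    l.foldl PySem.Set.add (a :: s) = a :: l.foldl PySem.Set.add s := by
  induction l generalizing s with
  | nil => rfl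
  | cons x tl ih =>
    have hxa : x ≠ a := fun h => ha (by simp [h])
    have ha' : a ∉ tl := fun h => ha (List.mem_cons_of_mem _ h)
    by_cases hc : x ∈ s
    · rw [List.foldl_cons, List.foldl_cons, set_add_mem _ _ (List.mem_cons_of_mem _ hc),
        set_add_mem _ _ hc]
      exact ih s ha'
    · have h1 : x ∉ a :: s := by simp [hxa, hc]
      rw [List.foldl_cons, List.foldl_cons, set_add_not_mem _ _ h1, set_add_not_mem _ _ hc,
        List.cons_append]
      exact ih (s ++ [x]) ha'

theorem ofList_cons_filter (k : String) (tl : List String) :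
    PySem.Set.ofList (k :: tl) = k :: PySem.Set.ofList (tl.filter (fun x => x ≠ k)) := by
  rw [PySem.Set.ofList_eq_foldl, PySem.Set.ofList_eq_foldl, List.foldl_cons,
    set_add_not_mem [] k (by simp), List.nil_append,
    ofList_foldl_add_filter [k] k (by simp) tl,
    foldl_add_cons k [] (tl.filter (fun x => x ≠ k)) (by simp)]

-- splitting tl at k: count of k plus length of the filtered rest is the length
theorem count_add_filter_length (k : String) (tl : List String) :
    tl.count k + (tl.filter (fun x => x ≠ k)).length = tl.length := by
  induction tl with
  | nil => simp
  | cons x tl ih =>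
    by_cases hx : x = k
    · subst hx
      simp at ih ⊢
      omega
    · simp [hx] at ih ⊢
      omega

-- the count-and-remove recursion computes Counter's items
theorem grcGo_eq_map_count (n : Nat) (ks : List String) (h : ks.length ≤ n) :
    grcGo ks = (PySem.Set.ofList ks).map (fun k => (k, (ks.count k : Int))) := by
  induction n generalizing ks with
  | zero =>
    have : ks = [] := List.length_eq_zero_iff.mp (Nat.le_zero.mp h)
    subst this
    simp [grcGo, PySem.Set.ofList_eq_foldl]
  | succ n ih =>
    match ks with
    | [] => simp [grcGo, PySem.Set.ofList_eq_foldl]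
    | k :: tl =>
      rw [grcGo, ofList_cons_filter, List.map_cons]
      have hsplit := count_add_filter_length k tl
      congr 1
      · have hcnt : (k :: tl).length - (tl.filter (fun x => x ≠ k)).length = (k :: tl).count k := by
          simp only [List.length_cons, List.count_cons_self]
          omega
        rw [hcnt]
      · rw [ih (tl.filter (fun x => x ≠ k))
          (le_trans (List.length_filter_le _ _) (Nat.le_of_succ_le_succ (by simpa using h)))]
        apply List.map_congr_left
        intro x hx
        have hxr : x ∈ tl.filter (fun y => y ≠ k) := (PySem.Set.mem_ofList _ _).mp hx
        have hm := List.mem_filter.mp hxr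
        have hxk : x ≠ k := by simpa using hm.2
        have hcc : (k :: tl).count x = (tl.filter (fun y => y ≠ k)).count x := by
          rw [List.count_cons_of_ne (Ne.symm hxk), List.count_filter (by simpa using hxk)]
        rw [hcc]

-- ===== VERDICT =====
theorem get_rank_count_spec : Claim_equal_get_rank_count := by
  intro ranks _
  show get_rank_count ranks = get_rank_count_alt ranks
  rw [get_rank_count_eq_counter, PySem.Dict.items_counter, get_rank_count_alt,
    grcGo_eq_map_count (ranks.map (fun rank =>
      PySem.Str.join "" (rank.map (fun r => PySem.Int.toStr r)))).length _ (le_refl _)]
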